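-- pv_equiv track=rewrite | github.com/qj/lc | 1578.py | solve
-- ===== SOURCE A (Python) =====
-- from typing import List
--
-- def solve(s: str, cost: List[int]) -> int:
--     min_cost, i = 0, 0
--
--     while i < len(s) - 1:
--         max_cost_for_letter = 0
--         while i + 1 < len(s) and s[i] == s[i + 1]:
--             max_cost_for_letter = max(max_cost_for_letter, cost[i])
--             min_cost += cost[i]
--             i += 1
--         if max_cost_for_letter:
--             min_cost = min_cost + cost[i] - max(max_cost_for_letter, cost[i])
--         else:
--             i += 1
--     return min_cost
-- ===== SOURCE B (Python) =====
-- from typing import List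
--
-- def solve(s: str, cost: List[int]) -> int:
--     total = 0
--     prev = None
--     for i in range(1, len(s)):
--         if s[i] == s[i - 1]:
--             p = cost[i - 1] if prev is None else prev
--             c = cost[i]
--             total += min(p, c)
--             prev = max(p, c)
--         else:
--             prev = None
--     return total
-- ===== Notes on version B (the rewrite author's own statement) =====
-- stated objective: simpler
-- what changed: A delimits each equal-character run with nested while loops, accumulating the run's cost sum and cost max and then subtracting; B is one flat greedy pass over adjacent pairs that pays min(prev, cost[i]) the moment a pair is equal and carries the larger cost forward, never computing run extents, run sums or a run max. Pre_ restricts to the task's natural domain at the places the algorithms touch: wherever two adjacent characters are equal, both their costs must exist and be nonnegative; …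
-- outside the precondition, e.g. on solve('aa', [0, -4]): A returns 0, B returns -4; on solve('aa', [0]): A returns 0, B raises IndexError
import Mathlib
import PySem

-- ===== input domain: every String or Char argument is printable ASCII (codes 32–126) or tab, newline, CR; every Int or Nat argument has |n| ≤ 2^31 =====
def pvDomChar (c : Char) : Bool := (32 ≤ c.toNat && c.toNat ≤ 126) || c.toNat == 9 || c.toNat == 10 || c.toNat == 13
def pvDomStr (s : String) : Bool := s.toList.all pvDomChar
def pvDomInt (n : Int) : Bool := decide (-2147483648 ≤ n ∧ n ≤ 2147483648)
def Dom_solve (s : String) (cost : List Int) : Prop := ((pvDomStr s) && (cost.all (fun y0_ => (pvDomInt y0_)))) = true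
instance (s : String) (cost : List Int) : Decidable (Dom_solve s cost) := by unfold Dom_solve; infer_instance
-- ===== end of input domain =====

-- B replaces A's nested run-scanning while loops (run sum and run max, then a
-- subtraction per run) by the flat greedy pass that pays min(prev, cost[i]) at each
-- equal adjacent pair; objective: simpler. Pre_ restricts to the natural domain
-- (nonnegative deletion costs, cost covering s): outside it A's truthiness test
-- returns artefact values or B reads a cost entry A happens to skip.


-- ===== PORT A =====
-- inner while loop of A: walks to the end of the current equal run,
-- returns (max_cost_for_letter, min_cost, i)
def innerA (cs : List Char) (cost : List Int) (i : Nat) (maxc minc : Int) : Int × Int × Nat :=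
  if _h : i + 1 < cs.length ∧ cs.getD i ' ' = cs.getD (i + 1) ' ' then
    innerA cs cost (i + 1) (max maxc (PySem.List.pyGetD cost (i : Int) 0))
      (minc + PySem.List.pyGetD cost (i : Int) 0)
  else (maxc, minc, i)
termination_by cs.length - i
decreasing_by omega

-- outer while loop of A (fuel is only a totality guard; 2*len+2 always suffices)
def outerA (cs : List Char) (cost : List Int) : Nat → Nat → Int → Int
  | 0, _, minc => minc
  | fuel + 1, i, minc =>
    if i + 1 < cs.length then
      let t := innerA cs cost i 0 minc
      if t.1 ≠ 0 then
        outerA cs cost fuel t.2.2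
          (t.2.1 + PySem.List.pyGetD cost (t.2.2 : Int) 0 -
            max t.1 (PySem.List.pyGetD cost (t.2.2 : Int) 0))
      else outerA cs cost fuel (t.2.2 + 1) t.2.1
    else minc

def solve (s : String) (cost : List Int) : Int :=
  outerA s.toList cost (2 * s.toList.length + 2) 0 0

-- ===== PORT B =====
-- one iteration of B's flat for-loop: state is (total, prev); prev is None between runs
def stepB (cs : List Char) (cost : List Int) (st : Int × Option Int) (i : Nat) : Int × Option Int :=
  if cs.getD i ' ' = cs.getD (i - 1) ' ' then
    let p := match st.2 with
      | none => PySem.List.pyGetD cost ((i - 1 : Nat) : Int) 0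
      | some q => q
    let c := PySem.List.pyGetD cost ((i : Nat) : Int) 0
    (st.1 + min p c, some (max p c))
  else (st.1, none)

def solve_alt (s : String) (cost : List Int) : Int :=
  ((PySem.List.pyRange 1 (s.toList.length : Int) 1).foldl
      (fun st i => stepB s.toList cost st i.toNat) (0, none)).1

-- ===== PRECONDITION & SPEC =====
-- Pre_ restricts to the task's natural domain at the places the algorithms touch:
-- wherever two adjacent characters are equal, both their costs must exist and be
-- nonnegative. It does exclude some inputs on which A returns (a negative or missing
-- cost at an equal pair): there A's truthiness test on the run max yields artefact
-- values, or A returns by never reading an entry B's pass needs.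
def Pre_solve (s : String) (cost : List Int) : Prop :=
  ∀ i < s.toList.length, i + 1 < s.toList.length →
    s.toList.getD i ' ' = s.toList.getD (i + 1) ' ' →
    i + 1 < cost.length ∧ 0 ≤ cost.getD i 0 ∧ 0 ≤ cost.getD (i + 1) 0
instance (s : String) (cost : List Int) : Decidable (Pre_solve s cost) := by
  unfold Pre_solve; infer_instance

def pvWitness_solve : String × List Int := ("aab", [1, 2, 3])

def Spec_solve (s : String) (cost : List Int) (out : Int) : Prop := out = solve_alt s cost
instance (s : String) (cost : List Int) (out : Int) : Decidable (Spec_solve s cost out) := by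
  unfold Spec_solve; infer_instance

-- ===== CLAIM (what is proved, stated in full; the proofs are below) =====
def Claim_equal_solve : Prop :=
  ∀ (s : String) (cost : List Int), Dom_solve s cost → Pre_solve s cost →
    Spec_solve s cost (solve s cost)

-- ===== LEMMAS AND PROOFS =====

def runEnd (cs : List Char) (i : Nat) : Nat :=
  if h : i + 1 < cs.length ∧ cs.getD i ' ' = cs.getD (i + 1) ' ' then runEnd cs (i + 1) else i
termination_by cs.length - i
decreasing_by omega

lemma runEnd_step (cs : List Char) (i : Nat)
    (h : i + 1 < cs.length ∧ cs.getD i ' ' = cs.getD (i + 1) ' ') :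
    runEnd cs i = runEnd cs (i + 1) := by
  conv_lhs => rw [runEnd]
  rw [dif_pos h]

lemma runEnd_base (cs : List Char) (i : Nat)
    (h : ¬ (i + 1 < cs.length ∧ cs.getD i ' ' = cs.getD (i + 1) ' ')) :
    runEnd cs i = i := by
  conv_lhs => rw [runEnd]
  rw [dif_neg h]

lemma runEnd_ge (cs : List Char) (i : Nat) : i ≤ runEnd cs i := by
  fun_induction runEnd cs i with
  | case1 i h ih => omega
  | case2 i _h => omega

lemma runEnd_lt (cs : List Char) (i : Nat) (h : i < cs.length) : runEnd cs i < cs.length := by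
  fun_induction runEnd cs i with
  | case1 i h ih => exact ih (by omega)
  | case2 i h2 => omega

lemma runEnd_exit (cs : List Char) (i : Nat) :
    ¬ (runEnd cs i + 1 < cs.length ∧
       cs.getD (runEnd cs i) ' ' = cs.getD (runEnd cs i + 1) ' ') := by
  fun_induction runEnd cs i with
  | case1 i h ih => exact ih
  | case2 i h => exact h

lemma runEnd_pair (cs : List Char) (i j : Nat) (h1 : i ≤ j) (h2 : j < runEnd cs i) :
    j + 1 < cs.length ∧ cs.getD j ' ' = cs.getD (j + 1) ' ' := by
  fun_induction runEnd cs i generalizing j with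
  | case1 i h ih =>
      rcases Nat.eq_or_lt_of_le h1 with rfl | hlt
      · exact h
      · exact ih j (by omega) h2
  | case2 i _h => omega

lemma innerA_spec (cs : List Char) (cost : List Int) (i : Nat) (maxc minc : Int)
    (hj : ∀ j, i ≤ j → j < runEnd cs i → j < cost.length) :
    innerA cs cost i maxc minc =
      (((cost.drop i).take (runEnd cs i - i)).foldl max maxc,
       minc + ((cost.drop i).take (runEnd cs i - i)).sum, runEnd cs i) := by
  fun_induction innerA cs cost i maxc minc with
  | case1 i maxc minc h ih =>
      have hr : runEnd cs i = runEnd cs (i + 1) := runEnd_step cs i h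
      have hge : i + 1 ≤ runEnd cs (i + 1) := runEnd_ge cs (i + 1)
      have hi : i < cost.length := hj i (le_refl i) (by omega)
      have hdrop : cost.drop i = cost[i] :: cost.drop (i + 1) :=
        List.drop_eq_getElem_cons hi
      have htake : (cost.drop i).take (runEnd cs i - i)
          = cost[i] :: (cost.drop (i + 1)).take (runEnd cs (i + 1) - (i + 1)) := by
        rw [hdrop, hr]
        have : runEnd cs (i+1) - i = (runEnd cs (i+1) - (i+1)) + 1 := by omega
        rw [this, List.take_succ_cons]
      have hget : PySem.List.pyGetD cost (i : Int) 0 = cost[i] := by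
        simp [PySem.List.pyGetD_natCast, List.getD_eq_getElem?_getD, hi]
      rw [ih (by intro j h1 h2; exact hj j (by omega) (by omega))]
      rw [htake, hget, hr]
      simp only [List.foldl_cons, List.sum_cons, Prod.mk.injEq]
      exact ⟨trivial, by ring, trivial⟩
  | case2 i maxc minc h =>
      have hr : runEnd cs i = i := runEnd_base cs i h
      simp [hr]

-- A's remaining work from position i, run by run (the reference shape both loops meet)
def specFrom (cs : List Char) (cost : List Int) (i : Nat) : Int :=
  if i + 1 < cs.length then
    (let t := innerA cs cost i 0 0
     let c := PySem.List.pyGetD cost ((runEnd cs i : Nat) : Int) 0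
     if t.1 ≠ 0 then t.2.1 + c - max t.1 c else t.2.1) + specFrom cs cost (runEnd cs i + 1)
  else 0
termination_by cs.length - i
decreasing_by have := runEnd_ge cs i; omega

lemma specFrom_stop (cs : List Char) (cost : List Int) (i : Nat) (h : ¬ i + 1 < cs.length) :
    specFrom cs cost i = 0 := by
  rw [specFrom, if_neg h]

lemma outerA_eq_specFrom (cs : List Char) (cost : List Int)
    (hpre : ∀ j, j + 1 < cs.length → cs.getD j ' ' = cs.getD (j + 1) ' ' → j + 1 < cost.length) :
    ∀ (k i : Nat) (minc : Int) (fuel : Nat), cs.length - i ≤ k →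
      2 * (cs.length - i) + 2 ≤ fuel →
      outerA cs cost fuel i minc = minc + specFrom cs cost i := by
  intro k
  induction k with
  | zero =>
    intro i minc fuel hk hf
    have hg : ¬ i + 1 < cs.length := by omega
    obtain ⟨f, rfl⟩ : ∃ f, fuel = f + 1 := ⟨fuel - 1, by omega⟩
    rw [outerA, if_neg hg, specFrom_stop cs cost i hg]
    ring
  | succ k ih =>
    intro i minc fuel hk hf
    by_cases hg : i + 1 < cs.length
    · have hrlt : runEnd cs i < cs.length := runEnd_lt cs i (by omega)
      have hge : i ≤ runEnd cs i := runEnd_ge cs i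
      have hj : ∀ j, i ≤ j → j < runEnd cs i → j < cost.length := by
        intro j h1 h2
        have hp := runEnd_pair cs i j h1 h2
        have := hpre j hp.1 hp.2
        omega
      obtain ⟨f, rfl⟩ : ∃ f, fuel = f + 1 := ⟨fuel - 1, by omega⟩
      rw [outerA, if_pos hg, innerA_spec cs cost i 0 minc hj,
        specFrom, if_pos hg, innerA_spec cs cost i 0 0 hj]
      simp only [zero_add]
      set r := runEnd cs i with hrdef
      set P := (cost.drop i).take (r - i) with hPdef
      set X := P.foldl max 0 with hXdef
      set S := P.sum with hSdef
      set c := PySem.List.pyGetD cost (r : Int) 0 with hcdef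
      by_cases hx : X ≠ 0
      · -- run whose max is nonzero; A stays at r for one extra outer step
        have hir : i < r := by
          rcases Nat.eq_or_lt_of_le hge with heq | h
          · exfalso; apply hx
            rw [hXdef, hPdef, ← heq]
            simp
          · exact h
        rw [if_pos hx, if_pos hx]
        obtain ⟨f', rfl⟩ : ∃ f', f = f' + 1 := ⟨f - 1, by omega⟩
        by_cases hg2 : r + 1 < cs.length
        · rw [outerA, if_pos hg2]
          have hstay : innerA cs cost r 0 (minc + S + c - max X c) =
              (0, minc + S + c - max X c, r) := by
            rw [innerA, dif_neg (hrdef ▸ runEnd_exit cs i)]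
          rw [hstay]
          simp only [ne_eq, not_true_eq_false, if_false]
          rw [ih (r + 1) (minc + S + c - max X c) f' (by omega) (by omega)]
          ring
        · rw [outerA, if_neg hg2, specFrom_stop cs cost (r + 1) (by omega)]
          ring
      · -- run max is zero: A's truthiness test fails, it just steps past the run end
        rw [if_neg hx, if_neg hx]
        rw [ih (r + 1) (minc + S) f (by omega) (by omega)]
        ring
    · obtain ⟨f, rfl⟩ : ∃ f, fuel = f + 1 := ⟨fuel - 1, by omega⟩
      rw [outerA, if_neg hg, specFrom_stop cs cost i hg]
      ring

-- B's loop across one run's interior indices i+1 … i+n (all equal pairs), prev known: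
-- total gains p + sum(window) - max, prev becomes the window max seeded with p
lemma stepB_run (cs : List Char) (cost : List Int) :
    ∀ (n i : Nat) (total p : Int),
      (∀ j, i < j → j ≤ i + n → j < cs.length ∧ cs.getD j ' ' = cs.getD (j - 1) ' ') →
      i + n < cost.length →
      ((PySem.List.pyRange ((i : Int) + 1) ((i : Int) + (n : Int) + 1) 1).foldl
          (fun st j => stepB cs cost st j.toNat) (total, some p)) =
        (total + p + ((cost.drop (i + 1)).take n).sum - ((cost.drop (i + 1)).take n).foldl max p,
         some (((cost.drop (i + 1)).take n).foldl max p)) := by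
  intro n
  induction n with
  | zero =>
    intro i total p _hall _hlen
    rw [PySem.List.pyRange_one_eq_nil (by omega), List.foldl_nil]
    simp
  | succ n ih =>
    intro i total p hall hlen
    have hi1 : i + 1 < cost.length := by omega
    have heq : cs.getD (i + 1) ' ' = cs.getD (i + 1 - 1) ' ' := by
      have := (hall (i + 1) (by omega) (by omega)).2
      simpa using this
    rw [PySem.List.pyRange_one_cons (by omega), List.foldl_cons]
    have htn : ((i : Int) + 1).toNat = i + 1 := by omega
    simp only [htn]
    rw [stepB, if_pos heq]
    dsimp only
    have hget : PySem.List.pyGetD cost ((i + 1 : Nat) : Int) 0 = cost[i + 1] := by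
      rw [PySem.List.pyGetD_natCast]
      simp [List.getD_eq_getElem?_getD, hi1]
    rw [hget]
    have hcast : (i : Int) + 1 + 1 = ((i + 1 : Nat) : Int) + 1 := by push_cast; ring
    have hcast2 : (i : Int) + ((n : Nat) + 1 : Nat) + 1 = ((i + 1 : Nat) : Int) + (n : Int) + 1 := by
      push_cast; ring
    rw [hcast, hcast2,
      ih (i + 1) (total + min p cost[i + 1]) (max p cost[i + 1])
        (by intro j h1 h2; exact hall j (by omega) (by omega)) (by omega)]
    have hdrop : cost.drop (i + 1) = cost[i + 1] :: cost.drop (i + 2) :=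
      List.drop_eq_getElem_cons hi1
    have htake : (cost.drop (i + 1)).take (n + 1) = cost[i + 1] :: (cost.drop (i + 2)).take n := by
      rw [hdrop, List.take_succ_cons]
    rw [htake]
    simp only [List.foldl_cons, List.sum_cons, Prod.mk.injEq]
    constructor
    · have hmm := min_add_max p cost[i + 1]
      have hii : i + 1 + 1 = i + 2 := by omega
      simp only [hii]
      omega
    · trivial

-- B's whole loop from position i (prev = None) equals A's remaining work
lemma stepB_eq_specFrom (cs : List Char) (cost : List Int)
    (hpre : ∀ j, j + 1 < cs.length → cs.getD j ' ' = cs.getD (j + 1) ' ' →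
      j + 1 < cost.length ∧ 0 ≤ cost.getD j 0 ∧ 0 ≤ cost.getD (j + 1) 0) :
    ∀ (k i : Nat) (total : Int), cs.length - i ≤ k →
      ((PySem.List.pyRange ((i : Int) + 1) ((cs.length : Int)) 1).foldl
          (fun st j => stepB cs cost st j.toNat) (total, none)).1 =
        total + specFrom cs cost i := by
  intro k
  induction k with
  | zero =>
    intro i total hk
    rw [PySem.List.pyRange_one_eq_nil (by omega), List.foldl_nil,
      specFrom_stop cs cost i (by omega)]
    ring
  | succ k ih =>
    intro i total hk
    by_cases hg : i + 1 < cs.length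
    · have hrlt : runEnd cs i < cs.length := runEnd_lt cs i (by omega)
      have hge : i ≤ runEnd cs i := runEnd_ge cs i
      set r := runEnd cs i with hrdef
      have hpair : ∀ j, i ≤ j → j < r → j + 1 < cs.length ∧ cs.getD j ' ' = cs.getD (j + 1) ' ' := by
        intro j h1 h2
        exact runEnd_pair cs i j h1 (hrdef ▸ h2)
      have hj : ∀ j, i ≤ j → j < r → j < cost.length := by
        intro j h1 h2
        have hp := hpair j h1 h2
        have := (hpre j hp.1 hp.2).1
        omega
      -- split the index range at the end of the current run
      rw [PySem.List.pyRange_one_append ((i : Int) + 1) ((r : Int) + 1) ((cs.length : Int))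
        (by omega) (by omega), List.foldl_append]
      by_cases hir : i < r
      · -- a real run: the first pair materialises prev = cost[i]
        have hp0 := hpair i le_rfl hir
        have hic : i < cost.length := by
          have := (hpre i hp0.1 hp0.2).1
          omega
        have hrc : r < cost.length := by
          have hp1 := hpair (r - 1) (by omega) (by omega)
          have := (hpre (r - 1) hp1.1 hp1.2).1
          omega
        have hci : (0 : Int) ≤ cost[i] := by
          have := (hpre i hp0.1 hp0.2).2.1
          rwa [List.getD_eq_getElem?_getD, List.getElem?_eq_getElem hic,
            Option.getD_some] at this
        have hcr : (0 : Int) ≤ cost[r] := by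
          have hp1 := hpair (r - 1) (by omega) (by omega)
          have := (hpre (r - 1) hp1.1 hp1.2).2.2
          have h11 : r - 1 + 1 = r := by omega
          rw [h11] at this
          rwa [List.getD_eq_getElem?_getD, List.getElem?_eq_getElem hrc,
            Option.getD_some] at this
        have hgeti : PySem.List.pyGetD cost ((i : Nat) : Int) 0 = cost[i] := by
          rw [PySem.List.pyGetD_natCast]
          simp [List.getD_eq_getElem?_getD, hic]
        have heq1 : cs.getD (i + 1) ' ' = cs.getD (i + 1 - 1) ' ' := by
          have := hp0.2
          simpa using this.symm
        have hswap :
            ((PySem.List.pyRange ((i : Int) + 1) ((r : Int) + 1) 1).foldl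
                (fun st j => stepB cs cost st j.toNat) (total, (none : Option Int))) =
            ((PySem.List.pyRange ((i : Int) + 1) ((r : Int) + 1) 1).foldl
                (fun st j => stepB cs cost st j.toNat) (total, some cost[i])) := by
          rw [PySem.List.pyRange_one_cons (by omega), List.foldl_cons, List.foldl_cons]
          congr 1
          have htn : ((i : Int) + 1).toNat = i + 1 := by omega
          simp only [htn]
          rw [stepB, stepB, if_pos heq1, if_pos heq1]
          dsimp only
          have h11 : i + 1 - 1 = i := by omega
          rw [h11, hgeti]
        rw [hswap]
        have hrun := stepB_run cs cost (r - i) i total cost[i]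
          (by
            intro j h1 h2
            have hp := hpair (j - 1) (by omega) (by omega)
            have hj1 : j - 1 + 1 = j := by omega
            rw [hj1] at hp
            exact ⟨by omega, hp.2.symm⟩)
          (by omega)
        have hcast : ((i : Int) + ((r - i : Nat) : Int) + 1) = (r : Int) + 1 := by
          have h : ((r - i : Nat) : Int) = (r : Int) - (i : Int) := by omega
          rw [h]; ring
        rw [hcast] at hrun
        rw [hrun]
        set W := (cost.drop (i + 1)).take (r - i) with hWdef
        conv_rhs => rw [specFrom, if_pos hg, innerA_spec cs cost i 0 0 hj, ← hrdef]
        simp only [zero_add]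
        set P := (cost.drop i).take (r - i) with hPdef
        set c := PySem.List.pyGetD cost ((r : Nat) : Int) 0 with hcdef
        have hgetr : c = cost[r] := by
          rw [hcdef, PySem.List.pyGetD_natCast]
          simp [List.getD_eq_getElem?_getD, hrc]
        have hKey : cost[i] + W.sum - List.foldl max cost[i] W =
            (if List.foldl max 0 P ≠ 0 then P.sum + c - max (List.foldl max 0 P) c else P.sum) := by
          have hdropP : cost.drop i = cost[i] :: cost.drop (i + 1) :=
            List.drop_eq_getElem_cons hic
          have hPW : P = cost[i] :: W.dropLast ∧ W = W.dropLast ++ [cost[r]] := by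
            have hW1 : W = (cost.drop (i + 1)).take (r - i - 1) ++ [cost[r]] := by
              rw [hWdef]
              have h1 : r - i = (r - i - 1) + 1 := by omega
              rw [h1, List.take_add_one]
              have h2 : (cost.drop (i + 1))[r - i - 1]? = some cost[r] := by
                rw [List.getElem?_drop]
                have h3 : i + 1 + (r - i - 1) = r := by omega
                rw [h3, List.getElem?_eq_getElem hrc]
              rw [h2]
              rfl
            have hWd : W.dropLast = (cost.drop (i + 1)).take (r - i - 1) := by
              rw [hW1, List.dropLast_concat]
            refine ⟨?_, by rw [hWd]; exact hW1⟩
            rw [hPdef, hdropP, hWd]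
            have h1 : r - i = (r - i - 1) + 1 := by omega
            rw [h1, List.take_succ_cons]
            simp
          obtain ⟨hP, hW⟩ := hPW
          have hseed : max (0 : Int) cost[i] = cost[i] := max_eq_right hci
          have hX : List.foldl max 0 P = W.dropLast.foldl max cost[i] := by
            rw [hP, List.foldl_cons, hseed]
          have hM : List.foldl max cost[i] W = max (W.dropLast.foldl max cost[i]) c := by
            conv_lhs => rw [hW]
            rw [List.foldl_append, List.foldl_cons, List.foldl_nil, hgetr]
          have hS : cost[i] + W.sum = P.sum + c := by
            conv_lhs => rw [hW]
            rw [hP]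
            simp only [List.sum_append, List.sum_cons, List.sum_nil, hgetr]
            ring
          rw [hX, hM]
          by_cases hy : W.dropLast.foldl max cost[i] ≠ 0
          · rw [if_pos hy]
            linarith [hS]
          · rw [if_neg hy]
            rw [not_not] at hy
            have hc0 : (0 : Int) ≤ c := hgetr ▸ hcr
            rw [hy, max_eq_right hc0]
            linarith [hS]
        -- after the run: if anything remains, index r+1 resets prev, then recurse
        by_cases hg2 : r + 1 < cs.length
        · have hbound : ¬ cs.getD (r + 1) ' ' = cs.getD (r + 1 - 1) ' ' := by
            have hex := hrdef ▸ runEnd_exit cs i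
            simp only [Nat.add_sub_cancel]
            intro hcon
            exact hex ⟨hg2, hcon.symm⟩
          rw [PySem.List.pyRange_one_cons (by omega), List.foldl_cons]
          have htn : ((r : Int) + 1).toNat = r + 1 := by omega
          simp only [htn]
          rw [stepB, if_neg hbound]
          have hcast2 : (r : Int) + 1 + 1 = ((r + 1 : Nat) : Int) + 1 := by push_cast; ring
          simp only [hcast2]
          rw [ih (r + 1) _ (by omega)]
          linarith [hKey]
        · -- the run reaches the end of the string: nothing follows
          rw [PySem.List.pyRange_one_eq_nil (by omega), List.foldl_nil]
          rw [specFrom_stop cs cost (r + 1) (by omega)]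
          dsimp only
          linarith [hKey]
      · -- a single character before a boundary: B adds nothing here
        have hri : r = i := by omega
        rw [PySem.List.pyRange_one_eq_nil (by omega), List.foldl_nil]
        conv_rhs => rw [specFrom, if_pos hg, innerA_spec cs cost i 0 0 hj, ← hrdef]
        have h0 : r - i = 0 := by omega
        simp only [zero_add, h0, List.take_zero, List.foldl_nil, List.sum_nil, ne_eq,
          not_true_eq_false, if_false]
        by_cases hg2 : r + 1 < cs.length
        · have hbound : ¬ cs.getD (r + 1) ' ' = cs.getD (r + 1 - 1) ' ' := by
            have hex := hrdef ▸ runEnd_exit cs i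
            simp only [Nat.add_sub_cancel]
            intro hcon
            exact hex ⟨hg2, hcon.symm⟩
          rw [PySem.List.pyRange_one_cons (by omega), List.foldl_cons]
          have htn : ((r : Int) + 1).toNat = r + 1 := by omega
          simp only [htn]
          rw [stepB, if_neg hbound]
          have hcast2 : (r : Int) + 1 + 1 = ((r + 1 : Nat) : Int) + 1 := by push_cast; ring
          simp only [hcast2]
          rw [ih (r + 1) total (by omega)]
        · rw [PySem.List.pyRange_one_eq_nil (by omega), List.foldl_nil]
          rw [specFrom_stop cs cost (r + 1) (by omega)]
          ring
    · rw [PySem.List.pyRange_one_eq_nil (by omega), List.foldl_nil,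
        specFrom_stop cs cost i hg]
      ring

-- ===== VERDICT (by name: the statement is the Claim_ definition above) =====
theorem solve_spec : Claim_equal_solve := by
  intro s cost _hdom hpre
  unfold Spec_solve solve solve_alt
  have hpre' : ∀ j, j + 1 < s.toList.length →
      s.toList.getD j ' ' = s.toList.getD (j + 1) ' ' →
      j + 1 < cost.length ∧ 0 ≤ cost.getD j 0 ∧ 0 ≤ cost.getD (j + 1) 0 := by
    intro j hj heq
    exact hpre j (by omega) hj heq
  have hlenA : ∀ j, j + 1 < s.toList.length →
      s.toList.getD j ' ' = s.toList.getD (j + 1) ' ' → j + 1 < cost.length := by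
    intro j hj heq
    exact (hpre' j hj heq).1
  rw [outerA_eq_specFrom s.toList cost hlenA s.toList.length 0 0 (2 * s.toList.length + 2)
        (by omega) (by omega)]
  have hb := stepB_eq_specFrom s.toList cost hpre' s.toList.length 0 0 (by omega)
  simp only [Nat.cast_zero, zero_add] at hb ⊢
  rw [← hb]
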